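-- pv_equiv track=rewrite | github.com/hj2687787246/ai-coding-commander | legacy/agent-runtime/commander/transport/scripts/commander_phase_plan.py | _owned_path_conflicts
-- ===== SOURCE A (Python) =====
-- def _owned_path_conflicts(left: list[str], right: list[str]) -> bool:
--     for left_path in left:
--         for right_path in right:
--             if (
--                 left_path == right_path
--                 or left_path.startswith(f"{right_path}/")
--                 or right_path.startswith(f"{left_path}/")
--             ):
--                 return True
--     return False
-- ===== SOURCE B (Python) =====
-- def _ancestors(path):
--     anc = set()
--     for i, ch in enumerate(path):
--         if ch == '/':
--             anc.add(path[:i])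
--     return anc
--
--
-- def _owned_path_conflicts(left: list[str], right: list[str]) -> bool:
--     right_set = set(right)
--     blocked = set(right)
--     for r in right:
--         blocked |= _ancestors(r)
--     return any(
--         l in blocked or not right_set.isdisjoint(_ancestors(l))
--         for l in left
--     )
-- ===== Notes on version B (the rewrite author's own statement) =====
-- stated objective: alternative
-- what changed: replaces the nested pairwise scan with hash sets: one set of the right paths and one of the right paths plus all their slash-ancestor prefixes, so each left path is checked by set membership on its ancestors instead of being compared against every right path
import Mathlib
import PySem

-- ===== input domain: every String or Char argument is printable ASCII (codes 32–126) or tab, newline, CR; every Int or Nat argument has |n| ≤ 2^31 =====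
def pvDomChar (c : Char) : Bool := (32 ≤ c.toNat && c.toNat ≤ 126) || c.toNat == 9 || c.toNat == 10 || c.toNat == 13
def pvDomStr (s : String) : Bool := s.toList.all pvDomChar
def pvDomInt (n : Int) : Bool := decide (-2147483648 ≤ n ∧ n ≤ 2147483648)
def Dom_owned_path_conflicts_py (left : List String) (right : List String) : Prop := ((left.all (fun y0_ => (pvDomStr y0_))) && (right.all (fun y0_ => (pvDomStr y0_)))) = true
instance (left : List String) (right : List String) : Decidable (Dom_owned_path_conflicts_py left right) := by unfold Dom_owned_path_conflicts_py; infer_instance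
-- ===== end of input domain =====

-- B replaces A's nested pairwise scan with hash sets of the right paths and of their '/'-ancestor
-- prefixes, checking each left path by set membership on its ancestors (objective: alternative).

-- ===== PORT A =====
def owned_path_conflicts_py (left : List String) (right : List String) : Bool :=
  left.any (fun left_path => right.any (fun right_path =>
    left_path == right_path
    || PySem.Str.startswith left_path (right_path ++ "/")
    || PySem.Str.startswith right_path (left_path ++ "/")))

-- ===== PORT B =====
-- _ancestors(path): the set of prefixes path[:i] for each '/' at index i
def pvAncestors (path : String) : PySem.Set String :=
  (PySem.List.enumerate path.toList 0).foldl
    (fun anc ic =>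
      if ic.2 == '/' then PySem.Set.add anc (PySem.Str.slice path none (some ic.1)) else anc)
    PySem.Set.empty

def owned_path_conflicts_py_alt (left : List String) (right : List String) : Bool :=
  let right_set := PySem.Set.ofList right
  let blocked := right.foldl (fun b r => PySem.Set.union b (pvAncestors r)) (PySem.Set.ofList right)
  left.any (fun l =>
    PySem.Set.contains blocked l || !(PySem.Set.isdisjoint right_set (pvAncestors l)))

-- ===== PRECONDITION & SPEC =====
def Spec_owned_path_conflicts_py (left : List String) (right : List String) (out : Bool) : Prop := out = owned_path_conflicts_py_alt left right
instance (left : List String) (right : List String) (out : Bool) : Decidable (Spec_owned_path_conflicts_py left right out) := by unfold Spec_owned_path_conflicts_py; infer_instance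

-- ===== CLAIM (what is proved, stated in full; the proofs are below) =====
def Claim_equal_owned_path_conflicts_py : Prop := ∀ (left : List String) (right : List String), Dom_owned_path_conflicts_py left right → Spec_owned_path_conflicts_py left right (owned_path_conflicts_py left right)

-- ===== LEMMAS AND PROOFS =====

-- '(ys ++ "/") is a prefix of cs' ↔ 'ys is cs truncated at some slash'
lemma prefix_slash_iff (ys cs : List Char) :
    ys ++ ['/'] <+: cs ↔ ∃ k, k < cs.length ∧ cs[k]? = some '/' ∧ ys = cs.take k := by
  constructor
  · rintro ⟨t, ht⟩
    subst ht
    refine ⟨ys.length, by simp, ?_, ?_⟩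
    · simp
    · simp
  · rintro ⟨k, hk, hget, rfl⟩
    have h : cs.take (k + 1) = cs.take k ++ ['/'] := by
      rw [List.take_add_one, hget]; rfl
    exact h ▸ List.take_prefix (k + 1) cs

lemma mem_pvAncestors (x p : String) :
    x ∈ pvAncestors p ↔ x.toList ++ ['/'] <+: p.toList := by
  unfold pvAncestors
  rw [PySem.List.foldl_if_eq_foldl_filter, PySem.Set.mem_foldl_add, prefix_slash_iff]
  simp only [PySem.Set.empty, List.not_mem_nil, false_or, List.mem_filter,
    PySem.List.mem_enumerate_iff]
  constructor
  · rintro ⟨ic, ⟨⟨k, hk, rfl⟩, hc⟩, rfl⟩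
    refine ⟨k, hk, ?_, ?_⟩
    · have hc' : p.toList[k] = '/' := by simpa using hc
      simp [List.getElem?_eq_getElem hk, hc']
    · have h0 : ((0 : Int) + (k : Int)) = (k : Int) := by omega
      simp only [h0]
      simp [PySem.List.slice_to_natCast]
  · rintro ⟨k, hk, hget, hx⟩
    refine ⟨((0 : Int) + k, '/'), ⟨⟨k, hk, ?_⟩, by simp⟩, ?_⟩
    · have : p.toList[k] = '/' := by
        have := List.getElem?_eq_getElem hk
        rw [hget] at this; exact (Option.some_inj.mp this.symm)
      simp [this]
    · rw [← String.toList_inj]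
      simpa [PySem.List.slice_to_natCast] using hx

lemma mem_foldl_union (rs : List String) (s0 : PySem.Set String) (x : String) :
    x ∈ rs.foldl (fun b r => PySem.Set.union b (pvAncestors r)) s0 ↔
      x ∈ s0 ∨ ∃ r ∈ rs, x ∈ pvAncestors r := by
  induction rs generalizing s0 with
  | nil => simp
  | cons r rs ih =>
    simp only [List.foldl_cons, ih, PySem.Set.mem_union, List.mem_cons]
    constructor
    · rintro ((h | h) | ⟨r', hr', h⟩)
      · exact Or.inl h
      · exact Or.inr ⟨r, Or.inl rfl, h⟩
      · exact Or.inr ⟨r', Or.inr hr', h⟩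
    · rintro (h | ⟨r', (rfl | hr'), h⟩)
      · exact Or.inl (Or.inl h)
      · exact Or.inl (Or.inr h)
      · exact Or.inr ⟨r', hr', h⟩

lemma startswith_append_slash (a b : String) :
    PySem.Str.startswith a (b ++ "/") = true ↔ b.toList ++ ['/'] <+: a.toList := by
  rw [PySem.Str.startswith_eq, PySem.Chars.startswith_iff]
  simp

lemma isdisjoint_false_iff (right : List String) (l : String) :
    PySem.Set.isdisjoint (PySem.Set.ofList right) (pvAncestors l) = false ↔
      ∃ r ∈ right, r.toList ++ ['/'] <+: l.toList := by
  rw [Bool.eq_false_iff, ne_eq]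
  rw [show (PySem.Set.isdisjoint (PySem.Set.ofList right) (pvAncestors l) = true) ↔
      (∀ x ∈ PySem.Set.ofList right, x ∉ pvAncestors l) from
    PySem.Set.isdisjoint_iff _ _]
  simp [PySem.Set.mem_ofList, mem_pvAncestors]

-- ===== VERDICT (by name: the statement is the Claim_ definition above) =====
theorem owned_path_conflicts_py_spec : Claim_equal_owned_path_conflicts_py := by
  intro left right _
  unfold Spec_owned_path_conflicts_py owned_path_conflicts_py owned_path_conflicts_py_alt
  apply PySem.List.any_congr_mem
  intro l _
  rw [Bool.eq_iff_iff]
  simp only [List.any_eq_true, Bool.or_eq_true, beq_iff_eq, Bool.not_eq_true',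
    PySem.Set.contains_iff, startswith_append_slash, mem_foldl_union,
    PySem.Set.mem_ofList, mem_pvAncestors, isdisjoint_false_iff]
  constructor
  · rintro ⟨r, hr, ((rfl | h) | h)⟩
    · exact Or.inl (Or.inl hr)
    · exact Or.inr ⟨r, hr, h⟩
    · exact Or.inl (Or.inr ⟨r, hr, h⟩)
  · rintro ((hl | ⟨r, hr, h⟩) | ⟨r, hr, h⟩)
    · exact ⟨l, hl, Or.inl (Or.inl rfl)⟩
    · exact ⟨r, hr, Or.inr h⟩
    · exact ⟨r, hr, Or.inl (Or.inr h)⟩
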